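-- pv_equiv track=rewrite | github.com/prathamtandon/g4gproblems | Arrays/count_inversions_of_size_three.py | count_inversions_simple
-- ===== SOURCE A (Python) =====
-- def count_inversions_simple(list_of_numbers):
--
--     num_inversions = 0
--     end = len(list_of_numbers)
--     for i in range(end):
--         smaller_to_right = 0
--         for j in range(i+1, end):
--             if list_of_numbers[i] > list_of_numbers[j]:
--                 smaller_to_right += 1
--         greater_to_left = 0
--         for j in range(i):
--             if list_of_numbers[i] < list_of_numbers[j]:
--                 greater_to_left += 1
--         num_inversions += smaller_to_right * greater_to_left
--
--     return num_inversions
-- ===== SOURCE B (Python) =====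
-- def _bisect_right(s, v):
--     lo, hi = 0, len(s)
--     while lo < hi:
--         mid = (lo + hi) // 2
--         if v < s[mid]:
--             hi = mid
--         else:
--             lo = mid + 1
--     return lo
--
--
-- def _bisect_left(s, v):
--     lo, hi = 0, len(s)
--     while lo < hi:
--         mid = (lo + hi) // 2
--         if s[mid] < v:
--             lo = mid + 1
--         else:
--             hi = mid
--     return lo
--
--
-- def count_inversions_simple(list_of_numbers):
--     # Sweep left-to-right keeping the already-seen elements in a sorted list:
--     # the number of earlier elements greater than v is len(seen) - bisect_right(seen, v).
--     greater_left = []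
--     seen = []
--     for v in list_of_numbers:
--         pos = _bisect_right(seen, v)
--         greater_left.append(len(seen) - pos)
--         seen.insert(pos, v)
--     # Sweep right-to-left with another sorted list: bisect_left counts the later
--     # elements smaller than v; weight each by v's greater-left count.
--     total = 0
--     seen = []
--     for v, g in zip(reversed(list_of_numbers), reversed(greater_left)):
--         pos = _bisect_left(seen, v)
--         total += g * pos
--         seen.insert(pos, v)
--     return total
-- ===== Notes on version B (the rewrite author's own statement) =====
-- stated objective: faster
-- what changed: B replaces A's per-element quadratic index scans by two sweeps that maintain the already-seen elements in a sorted list with hand-rolled binary search: bisect_right gives each element's greater-to-left count, and a right-to-left sweep with bisect_left counts its smaller-to-right elements, accumulated as a weighted sum.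
import Mathlib
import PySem

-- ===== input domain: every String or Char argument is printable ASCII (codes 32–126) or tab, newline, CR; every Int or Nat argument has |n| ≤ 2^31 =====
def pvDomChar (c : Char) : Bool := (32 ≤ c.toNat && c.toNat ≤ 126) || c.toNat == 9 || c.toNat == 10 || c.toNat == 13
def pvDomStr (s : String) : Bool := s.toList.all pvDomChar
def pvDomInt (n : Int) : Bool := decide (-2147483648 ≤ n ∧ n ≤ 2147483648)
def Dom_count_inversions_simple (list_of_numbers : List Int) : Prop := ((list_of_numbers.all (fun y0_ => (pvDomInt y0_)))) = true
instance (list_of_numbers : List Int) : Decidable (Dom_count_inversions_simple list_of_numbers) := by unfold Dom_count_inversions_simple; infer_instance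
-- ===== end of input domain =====

-- B replaces A's per-element quadratic index scans by two sweeps over a maintained sorted
-- list with hand-rolled binary search (bisect_right for greater-to-left, bisect_left on a
-- reversed sweep for smaller-to-right); measurably faster (fewer comparisons).

-- ===== PORT A =====
def count_inversions_simple (list_of_numbers : List Int) : Int :=
  let end_ : Int := list_of_numbers.length
  (PySem.List.pyRange 0 end_ 1).foldl (fun num_inversions i =>
    let smaller_to_right : Int :=
      (PySem.List.pyRange (i + 1) end_ 1).foldl (fun s j =>
        if PySem.List.pyGetD list_of_numbers i 0 > PySem.List.pyGetD list_of_numbers j 0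
        then s + 1 else s) 0
    let greater_to_left : Int :=
      (PySem.List.pyRange 0 i 1).foldl (fun g j =>
        if PySem.List.pyGetD list_of_numbers i 0 < PySem.List.pyGetD list_of_numbers j 0
        then g + 1 else g) 0
    num_inversions + smaller_to_right * greater_to_left) 0

-- ===== PORT B =====
-- hand-rolled bisect loops of Source B (while lo < hi, mid = (lo+hi)//2), transliterated
def bisectRightB (s : List Int) (v : Int) (lo hi : Int) : Int :=
  if h : lo < hi then
    let mid := PySem.Int.floordiv (lo + hi) 2
    if v < PySem.List.pyGetD s mid 0 then bisectRightB s v lo mid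
    else bisectRightB s v (mid + 1) hi
  else lo
termination_by (hi - lo).toNat
decreasing_by
  · have _h1 := (PySem.Int.floordiv_two_mid_bounds (le_of_lt h)).1
    have h2 : PySem.Int.floordiv (lo + hi) 2 < hi :=
      (PySem.Int.floordiv_lt_iff_lt_mul (by norm_num)).mpr (by omega)
    omega
  · have _h1 := (PySem.Int.floordiv_two_mid_bounds (le_of_lt h)).1
    have h2 : PySem.Int.floordiv (lo + hi) 2 < hi :=
      (PySem.Int.floordiv_lt_iff_lt_mul (by norm_num)).mpr (by omega)
    omega

def bisectLeftB (s : List Int) (v : Int) (lo hi : Int) : Int :=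
  if h : lo < hi then
    let mid := PySem.Int.floordiv (lo + hi) 2
    if PySem.List.pyGetD s mid 0 < v then bisectLeftB s v (mid + 1) hi
    else bisectLeftB s v lo mid
  else lo
termination_by (hi - lo).toNat
decreasing_by
  · have _h1 := (PySem.Int.floordiv_two_mid_bounds (le_of_lt h)).1
    have h2 : PySem.Int.floordiv (lo + hi) 2 < hi :=
      (PySem.Int.floordiv_lt_iff_lt_mul (by norm_num)).mpr (by omega)
    omega
  · have _h1 := (PySem.Int.floordiv_two_mid_bounds (le_of_lt h)).1
    have h2 : PySem.Int.floordiv (lo + hi) 2 < hi :=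
      (PySem.Int.floordiv_lt_iff_lt_mul (by norm_num)).mpr (by omega)
    omega

def count_inversions_simple_alt (list_of_numbers : List Int) : Int :=
  let p1 := list_of_numbers.foldl (fun (st : List Int × List Int) v =>
      let pos := bisectRightB st.2 v 0 st.2.length
      (st.1 ++ [(st.2.length : Int) - pos], PySem.List.insert st.2 pos v))
    ([], [])
  let greater_left := p1.1
  let p2 := ((list_of_numbers.reverse).zip greater_left.reverse).foldl
    (fun (st : Int × List Int) vg =>
      let pos := bisectLeftB st.2 vg.1 0 st.2.length
      (st.1 + vg.2 * pos, PySem.List.insert st.2 pos vg.1))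
    (0, [])
  p2.1

-- ===== PRECONDITION & SPEC =====
def Spec_count_inversions_simple (list_of_numbers : List Int) (out : Int) : Prop := out = count_inversions_simple_alt list_of_numbers
instance (list_of_numbers : List Int) (out : Int) : Decidable (Spec_count_inversions_simple list_of_numbers out) := by unfold Spec_count_inversions_simple; infer_instance

-- ===== CLAIM (what is proved, stated in full; the proofs are below) =====
def Claim_equal_count_inversions_simple : Prop := ∀ (list_of_numbers : List Int), Dom_count_inversions_simple list_of_numbers → Spec_count_inversions_simple list_of_numbers (count_inversions_simple list_of_numbers)

-- ===== LEMMAS AND PROOFS =====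

-- greater-to-left table of the list `r` seen after the prefix `p`
def gl_of (p r : List Int) : List Int :=
  match r with
  | [] => []
  | v :: t => ((p.countP (fun x => decide (v < x)) : Nat) : Int) :: gl_of (p ++ [v]) t

-- weighted sum accumulated by B's second sweep over the (value, weight) list
def q_of (z : List (Int × Int)) : Int :=
  match z with
  | [] => 0
  | (v, g) :: t => q_of t + g * (((t.map Prod.fst).countP (fun x => decide (x < v)) : Nat) : Int)

-- A's triple count, prefix-peeled: term of the head v with earlier elements p, later t
def a_of (p r : List Int) : Int :=
  match r with
  | [] => 0
  | v :: t => ((t.countP (fun x => decide (x < v)) : Nat) : Int) *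
                ((p.countP (fun x => decide (v < x)) : Nat) : Int) + a_of (p ++ [v]) t

theorem gl_of_length (p r : List Int) : (gl_of p r).length = r.length := by
  induction r generalizing p with
  | nil => rfl
  | cons v t ih => simp [gl_of, ih]

-- a conditional loop that adds 1 per hit is a countP
theorem foldl_ite_add_one {α : Type} (l : List α) (p : α → Prop) [DecidablePred p] (a : Int) :
    l.foldl (fun acc x => if p x then acc + 1 else acc) a
      = a + (l.countP (fun x => decide (p x)) : Int) := by
  induction l generalizing a with
  | nil => simp
  | cons x t ih =>
    by_cases h : p x
    · simp [h, ih]; ring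
    · simp [h, ih]

-- the value-level prefix l[:i] is the index range [0, i) read through pyGetD
theorem take_eq_map_pyRange (l : List Int) (i : Int) (h0 : 0 ≤ i) (h : i ≤ l.length) :
    l.take i.toNat = (PySem.List.pyRange 0 i 1).map (fun j => PySem.List.pyGetD l j 0) := by
  have this := PySem.List.map_pyGetD_pyRange (xs := l.take i.toNat) (a := 0) (d := 0) (by omega)
  simp at this
  rw [show min (max i 0) ((l.length : Int)) = i by omega] at this
  rw [← this]
  apply List.map_congr_left
  intro j hj
  rw [PySem.List.mem_pyRange_one] at hj
  rw [PySem.List.pyGetD_eq_getElem _ _ hj.1 (by simp; omega),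
      PySem.List.pyGetD_eq_getElem _ _ hj.1 (by omega),
      List.getElem_take]

-- binary-search invariant: bisectRightB returns the count of elements ≤ v
theorem sorted_getElem_le (s : List Int) (hs : List.Pairwise (· ≤ ·) s) (i j : Nat)
    (hi : i < s.length) (hj : j < s.length) (hij : i ≤ j) : s[i] ≤ s[j] := by
  rcases Nat.lt_or_ge i j with h | h
  · exact (List.pairwise_iff_getElem.mp hs) i j hi hj h
  · have hij' : i = j := by omega
    subst hij'; exact le_refl _

theorem mem_take_getElem (s : List Int) (n : Nat) (x : Int) (hx : x ∈ s.take n) :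
    ∃ j, ∃ hj : j < s.length, j < n ∧ s[j] = x := by
  obtain ⟨k, hk, hxk⟩ := List.getElem_of_mem hx
  rw [List.getElem_take] at hxk
  exact ⟨k, by simp at hk; omega, by simp at hk; omega, hxk⟩

theorem mem_drop_getElem (s : List Int) (n : Nat) (x : Int) (hx : x ∈ s.drop n) :
    ∃ j, ∃ hj : j < s.length, n ≤ j ∧ s[j] = x := by
  obtain ⟨k, hk, hxk⟩ := List.getElem_of_mem hx
  rw [List.getElem_drop] at hxk
  exact ⟨n + k, by simp at hk; omega, by omega, hxk⟩

theorem bisectRightB_spec (s : List Int) (v : Int) (hs : List.Pairwise (· ≤ ·) s) :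
    ∀ (lo hi : Int), 0 ≤ lo → lo ≤ hi → hi ≤ s.length →
    (∀ x ∈ s.take lo.toNat, x ≤ v) → (∀ x ∈ s.drop hi.toNat, v < x) →
    ∃ r : Nat, bisectRightB s v lo hi = (r : Int) ∧ r ≤ s.length ∧
      (∀ x ∈ s.take r, x ≤ v) ∧ (∀ x ∈ s.drop r, v < x) := by
  intro lo hi
  fun_induction bisectRightB s v lo hi with
  | case1 lo hi h mid hv ih =>
    intro h0 hlh hhi hL hR
    have hm := PySem.Int.floordiv_two_mid_bounds (le_of_lt h)
    have hmlt : mid < hi := (PySem.Int.floordiv_lt_iff_lt_mul (by norm_num)).mpr (by omega)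
    have hmget : PySem.List.pyGetD s mid 0 = s[mid.toNat]'(by omega) :=
      PySem.List.pyGetD_eq_getElem _ _ (by omega) (by omega)
    apply ih h0 (by omega) (by omega) hL
    intro x hx
    obtain ⟨j, hj, hjge, hxj⟩ := mem_drop_getElem s mid.toNat x hx
    have := sorted_getElem_le s hs mid.toNat j (by omega) hj hjge
    rw [hmget] at hv; omega
  | case2 lo hi h mid hv ih =>
    intro h0 hlh hhi hL hR
    have hm := PySem.Int.floordiv_two_mid_bounds (le_of_lt h)
    have hmlt : mid < hi := (PySem.Int.floordiv_lt_iff_lt_mul (by norm_num)).mpr (by omega)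
    have hmget : PySem.List.pyGetD s mid 0 = s[mid.toNat]'(by omega) :=
      PySem.List.pyGetD_eq_getElem _ _ (by omega) (by omega)
    apply ih (by omega) (by omega) hhi _ hR
    intro x hx
    obtain ⟨j, hj, hjlt, hxj⟩ := mem_take_getElem s (mid + 1).toNat x hx
    have := sorted_getElem_le s hs j mid.toNat hj (by omega) (by omega)
    rw [hmget] at hv; omega
  | case3 lo hi h =>
    intro h0 hlh hhi hL hR
    exact ⟨lo.toNat, by omega, by omega, by simpa using hL,
      by rw [show lo.toNat = hi.toNat by omega]; exact hR⟩

theorem bisectLeftB_spec (s : List Int) (v : Int) (hs : List.Pairwise (· ≤ ·) s) :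
    ∀ (lo hi : Int), 0 ≤ lo → lo ≤ hi → hi ≤ s.length →
    (∀ x ∈ s.take lo.toNat, x < v) → (∀ x ∈ s.drop hi.toNat, v ≤ x) →
    ∃ r : Nat, bisectLeftB s v lo hi = (r : Int) ∧ r ≤ s.length ∧
      (∀ x ∈ s.take r, x < v) ∧ (∀ x ∈ s.drop r, v ≤ x) := by
  intro lo hi
  fun_induction bisectLeftB s v lo hi with
  | case1 lo hi h mid hv ih =>
    intro h0 hlh hhi hL hR
    have hm := PySem.Int.floordiv_two_mid_bounds (le_of_lt h)
    have hmlt : mid < hi := (PySem.Int.floordiv_lt_iff_lt_mul (by norm_num)).mpr (by omega)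
    have hmget : PySem.List.pyGetD s mid 0 = s[mid.toNat]'(by omega) :=
      PySem.List.pyGetD_eq_getElem _ _ (by omega) (by omega)
    apply ih (by omega) (by omega) hhi _ hR
    intro x hx
    obtain ⟨j, hj, hjlt, hxj⟩ := mem_take_getElem s (mid + 1).toNat x hx
    have := sorted_getElem_le s hs j mid.toNat hj (by omega) (by omega)
    rw [hmget] at hv; omega
  | case2 lo hi h mid hv ih =>
    intro h0 hlh hhi hL hR
    have hm := PySem.Int.floordiv_two_mid_bounds (le_of_lt h)
    have hmlt : mid < hi := (PySem.Int.floordiv_lt_iff_lt_mul (by norm_num)).mpr (by omega)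
    have hmget : PySem.List.pyGetD s mid 0 = s[mid.toNat]'(by omega) :=
      PySem.List.pyGetD_eq_getElem _ _ (by omega) (by omega)
    apply ih h0 (by omega) (by omega) hL
    intro x hx
    obtain ⟨j, hj, hjge, hxj⟩ := mem_drop_getElem s mid.toNat x hx
    have := sorted_getElem_le s hs mid.toNat j (by omega) hj hjge
    rw [hmget] at hv; omega
  | case3 lo hi h =>
    intro h0 hlh hhi hL hR
    exact ⟨lo.toNat, by omega, by omega, by simpa using hL,
      by rw [show lo.toNat = hi.toNat by omega]; exact hR⟩

theorem zip_reverse {α β : Type} (a : List α) (b : List β) (h : a.length = b.length) :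
    (a.reverse).zip (b.reverse) = (a.zip b).reverse := by
  induction a generalizing b with
  | nil => cases b <;> simp_all
  | cons x t ih =>
    cases b with
    | nil => simp at h
    | cons y u =>
      simp only [List.reverse_cons]
      rw [List.zip_append (by simpa using congrArg (fun n => n - 1) h)]
      simp [ih u (by simpa using h)]

-- bundled facts about Source B's bisect_right on a sorted list
theorem brB_props (s : List Int) (v : Int) (hs : List.Pairwise (· ≤ ·) s) :
    ∃ r : Nat, bisectRightB s v 0 s.length = (r : Int) ∧ r ≤ s.length ∧
      ((s.length : Int) - (r : Int) = ((s.countP (fun x => decide (v < x)) : Nat) : Int)) ∧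
      List.Pairwise (· ≤ ·) (s.take r ++ v :: s.drop r) ∧
      (s.take r ++ v :: s.drop r).Perm (v :: s) := by
  obtain ⟨r, hval, hle, hT, hD⟩ :=
    bisectRightB_spec s v hs 0 s.length (le_refl 0) (by omega) (by omega)
      (by simp) (by simp)
  refine ⟨r, hval, hle, ?_, ?_, ?_⟩
  · have hsplit : s.countP (fun x => decide (v < x))
        = (s.take r).countP (fun x => decide (v < x)) + (s.drop r).countP (fun x => decide (v < x)) := by
      conv_lhs => rw [← List.take_append_drop r s]
      exact List.countP_append
    have h1 : (s.take r).countP (fun x => decide (v < x)) = 0 :=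
      List.countP_eq_zero.mpr (fun a ha => by simpa using not_lt.mpr (hT a ha))
    have h2 : (s.drop r).countP (fun x => decide (v < x)) = (s.drop r).length :=
      List.countP_eq_length.mpr (fun a ha => by simpa using hD a ha)
    rw [hsplit, h1, h2, List.length_drop]
    omega
  · rw [List.pairwise_append]
    refine ⟨hs.sublist (List.take_sublist _ _), ?_, ?_⟩
    · rw [List.pairwise_cons]
      exact ⟨fun y hy => le_of_lt (hD y hy), hs.sublist (List.drop_sublist _ _)⟩
    · intro a ha b hb
      rcases List.mem_cons.mp hb with rfl | hb
      · exact hT a ha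
      · exact le_trans (hT a ha) (le_of_lt (hD b hb))
  · calc (s.take r ++ v :: s.drop r).Perm (v :: (s.take r ++ s.drop r)) := List.perm_middle
       _ = _ := by rw [List.take_append_drop]

-- bundled facts about Source B's bisect_left on a sorted list
theorem blB_props (s : List Int) (v : Int) (hs : List.Pairwise (· ≤ ·) s) :
    ∃ r : Nat, bisectLeftB s v 0 s.length = (r : Int) ∧ r ≤ s.length ∧
      ((r : Int) = ((s.countP (fun x => decide (x < v)) : Nat) : Int)) ∧
      List.Pairwise (· ≤ ·) (s.take r ++ v :: s.drop r) ∧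
      (s.take r ++ v :: s.drop r).Perm (v :: s) := by
  obtain ⟨r, hval, hle, hT, hD⟩ :=
    bisectLeftB_spec s v hs 0 s.length (le_refl 0) (by omega) (by omega)
      (by simp) (by simp)
  refine ⟨r, hval, hle, ?_, ?_, ?_⟩
  · have hsplit : s.countP (fun x => decide (x < v))
        = (s.take r).countP (fun x => decide (x < v)) + (s.drop r).countP (fun x => decide (x < v)) := by
      conv_lhs => rw [← List.take_append_drop r s]
      exact List.countP_append
    have h1 : (s.take r).countP (fun x => decide (x < v)) = (s.take r).length :=
      List.countP_eq_length.mpr (fun a ha => by simpa using hT a ha)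
    have h2 : (s.drop r).countP (fun x => decide (x < v)) = 0 :=
      List.countP_eq_zero.mpr (fun a ha => by simpa using not_lt.mpr (hD a ha))
    rw [hsplit, h1, h2, List.length_take]
    omega
  · rw [List.pairwise_append]
    refine ⟨hs.sublist (List.take_sublist _ _), ?_, ?_⟩
    · rw [List.pairwise_cons]
      exact ⟨fun y hy => hD y hy, hs.sublist (List.drop_sublist _ _)⟩
    · intro a ha b hb
      rcases List.mem_cons.mp hb with rfl | hb
      · exact le_of_lt (hT a ha)
      · exact le_trans (le_of_lt (hT a ha)) (hD b hb)
  · calc (s.take r ++ v :: s.drop r).Perm (v :: (s.take r ++ s.drop r)) := List.perm_middle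
       _ = _ := by rw [List.take_append_drop]

-- first sweep: the accumulated list is the greater-to-left table, seen stays sorted
theorem pass1 (rest : List Int) : ∀ (p seen gl : List Int),
    List.Pairwise (· ≤ ·) seen → seen.Perm p →
    ∃ seen', (rest.foldl (fun (st : List Int × List Int) v =>
      let pos := bisectRightB st.2 v 0 st.2.length
      (st.1 ++ [(st.2.length : Int) - pos], PySem.List.insert st.2 pos v)) (gl, seen))
      = (gl ++ gl_of p rest, seen') ∧ List.Pairwise (· ≤ ·) seen' ∧ seen'.Perm (p ++ rest) := by
  induction rest with
  | nil => exact fun p seen gl hs hperm => ⟨seen, by simp [gl_of], hs, by simpa using hperm⟩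
  | cons v t ih =>
    intro p seen gl hs hperm
    obtain ⟨r, hval, hle, hcnt, hsort', hperm'⟩ := brB_props seen v hs
    obtain ⟨seen', hfold, hs', hp'⟩ := ih (p ++ [v]) (seen.take r ++ v :: seen.drop r)
      (gl ++ [(seen.length : Int) - bisectRightB seen v 0 seen.length]) hsort'
      (hperm'.trans ((hperm.cons v).trans (by simpa using (List.perm_middle (a := v) (l₁ := p) (l₂ := ([] : List Int))).symm)))
    refine ⟨seen', ?_, hs', by simpa using hp'⟩
    rw [List.foldl_cons]
    simp only [hval] at hfold ⊢
    rw [PySem.List.insert_natCast seen r v hle, hfold]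
    have hglapp : gl ++ [(seen.length : Int) - (r : Int)] ++ gl_of (p ++ [v]) t
        = gl ++ gl_of p (v :: t) := by
      rw [gl_of]
      rw [hcnt, hperm.countP_eq (fun x => decide (v < x))]
      simp
    rw [← hglapp]

-- second sweep: folding the reversed (value, weight) pairs accumulates q_of
theorem pass2 (z : List (Int × Int)) : ∀ (t0 : Int),
    ∃ seen', (z.reverse.foldl (fun (st : Int × List Int) vg =>
        let pos := bisectLeftB st.2 vg.1 0 st.2.length
        (st.1 + vg.2 * pos, PySem.List.insert st.2 pos vg.1)) (t0, ([] : List Int)))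
      = (t0 + q_of z, seen') ∧ List.Pairwise (· ≤ ·) seen' ∧ seen'.Perm (z.map Prod.fst) := by
  induction z with
  | nil => exact fun t0 => ⟨[], by simp [q_of], by simp, by simp⟩
  | cons vg t ih =>
    intro t0
    obtain ⟨S, hfold, hS, hSp⟩ := ih t0
    obtain ⟨r, hval, hle, hcnt, hsort', hperm'⟩ := blB_props S vg.1 hS
    refine ⟨S.take r ++ vg.1 :: S.drop r, ?_, hsort', ?_⟩
    · rw [List.reverse_cons, List.foldl_append, hfold]
      simp only [List.foldl_cons, List.foldl_nil, hval]
      rw [PySem.List.insert_natCast S r vg.1 hle]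
      have : t0 + q_of t + vg.2 * (r : Int) = t0 + q_of (vg :: t) := by
        rw [q_of, hcnt, hSp.countP_eq (fun x => decide (x < vg.1))]
        ring
      rw [this]
    · exact hperm'.trans (hSp.cons vg.1)

theorem alt_eq (l : List Int) : count_inversions_simple_alt l = q_of (l.zip (gl_of [] l)) := by
  obtain ⟨seen1, hfold1, _, _⟩ := pass1 l [] [] [] (by simp) (by simp)
  obtain ⟨seen2, hfold2, _, _⟩ := pass2 (l.zip (gl_of [] l)) 0
  unfold count_inversions_simple_alt
  simp only [hfold1, List.nil_append]
  rw [zip_reverse l (gl_of [] l) (gl_of_length [] l).symm, hfold2]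
  simp

theorem qa (r : List Int) : ∀ (p : List Int), q_of (r.zip (gl_of p r)) = a_of p r := by
  induction r with
  | nil => intro p; simp [gl_of, q_of, a_of]
  | cons v t ih =>
    intro p
    simp only [gl_of, List.zip_cons_cons, q_of, a_of]
    rw [List.map_fst_zip (le_of_eq (gl_of_length (p ++ [v]) t).symm), ih (p ++ [v])]
    ring

theorem idx_a (r : List Int) : ∀ (p : List Int), a_of p r =
    ((List.range r.length).map (fun i =>
      (((r.drop (i+1)).countP (fun x => decide (x < r.getD i 0)) : Nat) : Int) *
      (((p.countP (fun x => decide (r.getD i 0 < x))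
         + (r.take i).countP (fun x => decide (r.getD i 0 < x)) : Nat)) : Int))).sum := by
  induction r with
  | nil => intro p; simp [a_of]
  | cons v t ih =>
    intro p
    rw [a_of, ih (p ++ [v])]
    conv_rhs => rw [List.length_cons, List.range_succ_eq_map]
    rw [List.map_cons, List.sum_cons, List.map_map]
    congr 1
    apply congrArg
    apply List.map_congr_left
    intro i hi
    simp only [Function.comp_apply, List.drop_succ_cons,
      List.take_succ_cons, List.countP_append, List.countP_cons, List.countP_nil,
      Nat.succ_eq_add_one, List.getD_eq_getElem?_getD, List.getElem?_cons_succ]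
    push_cast
    ring_nf
    exact add_right_comm _ _ _

theorem A_eq (l : List Int) : count_inversions_simple l = a_of [] l := by
  unfold count_inversions_simple
  simp only [foldl_ite_add_one, PySem.List.foldl_add, zero_add]
  rw [idx_a l [], PySem.List.pyRange_one, List.map_map]
  simp only [List.countP_nil, Int.sub_zero, Int.toNat_natCast, zero_add]
  apply congrArg
  apply List.map_congr_left
  intro k hk
  rw [List.mem_range] at hk
  simp only [Function.comp_apply]
  have hget : PySem.List.pyGetD l (k : Int) 0 = l.getD k 0 := by
    rw [PySem.List.pyGetD_eq_getElem _ _ (by omega) (by exact_mod_cast hk),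
      List.getD_eq_getElem l 0 hk]
    simp
  have hdrop := PySem.List.map_pyGetD_pyRange (xs := l) (a := (k : Int) + 1) (d := 0) (by omega)
  rw [show ((k : Int) + 1).toNat = k + 1 by omega] at hdrop
  have htake := take_eq_map_pyRange l (k : Int) (by omega) (by exact_mod_cast le_of_lt hk)
  rw [show ((k : Int)).toNat = k by omega] at htake
  rw [← hdrop, htake, List.countP_map, List.countP_map, hget]
  rfl

-- ===== VERDICT (by name: the statement is the Claim_ definition above) =====
theorem count_inversions_simple_spec : Claim_equal_count_inversions_simple := by
  intro l _
  unfold Spec_count_inversions_simple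
  rw [A_eq, alt_eq, qa]
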